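-- pv_equiv track=rewrite | github.com/pypi-data/pypi-mirror-403 | packages/iflow-mcp_viperjuice_code-index-mcp/iflow_mcp_viperjuice_code_index_mcp-1.0.0.tar.gz/iflow_mcp_viperjuice_code_index_mcp-1.0.0/mcp_server/plugins/csharp_plugin/namespace_resolver.py | get_namespace_hierarchy
-- ===== SOURCE A (Python) =====
-- from typing import Dict, List, Optional, Set
--
-- def get_namespace_hierarchy(namespace: str) -> List[str]:
--     """Get the hierarchy of a namespace (parent namespaces).
--
--     Args:
--         namespace: The namespace to analyze
--
--     Returns:
--         List of namespace parts from root to specific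
--     """
--     if not namespace:
--         return []
--
--     parts = namespace.split(".")
--     hierarchy = []
--
--     for i in range(len(parts)):
--         hierarchy.append(".".join(parts[: i + 1]))
--
--     return hierarchy
-- ===== SOURCE B (Python) =====
-- from typing import List
--
--
-- def get_namespace_hierarchy(namespace: str) -> List[str]:
--     """Get the hierarchy of a namespace (parent namespaces)."""
--     if not namespace:
--         return []
--
--     result = []
--     current = None
--     for part in namespace.split("."):
--         current = part if current is None else current + "." + part
--         result.append(current)
--     return result
-- ===== Notes on version B (the rewrite author's own statement) =====
-- stated objective: alternative
-- what changed: B keeps a running accumulator string extended once per part instead of re-joining a growing slice of the parts list on every iteration.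
import Mathlib
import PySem

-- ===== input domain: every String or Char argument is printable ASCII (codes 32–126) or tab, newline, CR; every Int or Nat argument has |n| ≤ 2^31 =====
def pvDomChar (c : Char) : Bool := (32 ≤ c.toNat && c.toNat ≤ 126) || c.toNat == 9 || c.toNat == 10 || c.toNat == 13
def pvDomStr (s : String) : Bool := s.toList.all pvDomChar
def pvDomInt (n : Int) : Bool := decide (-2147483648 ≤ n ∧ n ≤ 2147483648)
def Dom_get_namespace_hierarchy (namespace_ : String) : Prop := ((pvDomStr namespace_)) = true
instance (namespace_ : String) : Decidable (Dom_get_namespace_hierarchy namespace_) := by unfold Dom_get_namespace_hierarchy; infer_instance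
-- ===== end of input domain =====

-- B replaces A's per-step re-join of a growing slice by a running accumulator string extended once per part.


-- ===== PORT A =====
-- '.split(".")' is PySem.Str.split?; the separator is the literal "." ≠ "", so split? is always 'some' and the .getD [] default is never taken.
def get_namespace_hierarchy (namespace_ : String) : List String :=
  if namespace_ = "" then []
  else
    let parts := (PySem.Str.split? namespace_ ".").getD []
    (PySem.List.pyRange 0 parts.length 1).foldl
      (fun hierarchy i =>
        hierarchy ++ [PySem.Str.join "." (PySem.List.slice parts none (some (i + 1)))]) []

-- ===== PORT B =====
def get_namespace_hierarchy_alt (namespace_ : String) : List String :=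
  if namespace_ = "" then []
  else
    ((((PySem.Str.split? namespace_ ".").getD []).foldl
      (fun (st : List String × Option String) part =>
        let current := match st.2 with
          | none => part
          | some c => c ++ "." ++ part
        (st.1 ++ [current], some current)) ([], none))).1

-- ===== PRECONDITION & SPEC =====
def Spec_get_namespace_hierarchy (namespace_ : String) (out : List String) : Prop := out = get_namespace_hierarchy_alt namespace_
instance (namespace_ : String) (out : List String) : Decidable (Spec_get_namespace_hierarchy namespace_ out) := by unfold Spec_get_namespace_hierarchy; infer_instance

-- ===== CLAIM (what is proved, stated in full; the proofs are below) =====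
def Claim_equal_get_namespace_hierarchy : Prop := ∀ (namespace_ : String), Dom_get_namespace_hierarchy namespace_ → Spec_get_namespace_hierarchy namespace_ (get_namespace_hierarchy namespace_)

-- ===== LEMMAS AND PROOFS =====

-- cumulative dotted prefixes continuing from accumulator c
def prefJoins (c : String) : List String → List String
  | [] => []
  | p :: ps => (c ++ "." ++ p) :: prefJoins (c ++ "." ++ p) ps

theorem str_toList_inj {a b : String} (h : a.toList = b.toList) : a = b :=
  String.toList_inj.mp h

theorem join_pair (c p : String) : PySem.Str.join "." [c, p] = c ++ "." ++ p := by
  apply str_toList_inj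
  simp [PySem.Str.toList_join, PySem.Chars.join_cons_cons, PySem.Chars.join_singleton]

theorem join_cons_merge (c p : String) (l : List String) :
    PySem.Str.join "." (c :: p :: l) = PySem.Str.join "." ((c ++ "." ++ p) :: l) := by
  cases l with
  | nil =>
      apply str_toList_inj
      simp [PySem.Str.toList_join, PySem.Chars.join_cons_cons, PySem.Chars.join_singleton]
  | cons q l =>
      apply str_toList_inj
      simp [PySem.Str.toList_join, PySem.Chars.join_cons_cons]

theorem foldl_append_singleton {α β : Type} (f : α → β) (l : List α) (acc : List β) :
    l.foldl (fun h i => h ++ [f i]) acc = acc ++ l.map f := by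
  induction l generalizing acc with
  | nil => simp
  | cons x xs ih => simp [List.foldl_cons, ih, List.append_assoc]

theorem range_map_join (ps : List String) (c : String) :
    (List.range ps.length).map (fun k => PySem.Str.join "." (c :: ps.take (k + 1))) = prefJoins c ps := by
  induction ps generalizing c with
  | nil => simp [prefJoins]
  | cons p ps ih =>
      simp only [List.length_cons, List.range_succ_eq_map, List.map_cons, List.map_map, prefJoins,
        List.cons.injEq]
      constructor
      · exact join_pair c p
      · calc (List.range ps.length).map
              ((fun k => PySem.Str.join "." (c :: (p :: ps).take (k + 1))) ∘ Nat.succ)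
            = (List.range ps.length).map
              (fun k => PySem.Str.join "." ((c ++ "." ++ p) :: ps.take (k + 1))) := by
              apply List.map_congr_left
              intro k _
              simp [Function.comp, join_cons_merge]
          _ = prefJoins (c ++ "." ++ p) ps := ih _

theorem alt_fold_some (ps : List String) (c : String) (acc : List String) :
    (ps.foldl
      (fun (st : List String × Option String) part =>
        let current := match st.2 with
          | none => part
          | some c => c ++ "." ++ part
        (st.1 ++ [current], some current)) (acc, some c)).1 = acc ++ prefJoins c ps := by
  induction ps generalizing c acc with
  | nil => simp [prefJoins]
  | cons p ps ih => simp [List.foldl_cons, prefJoins, ih, List.append_assoc]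

theorem map_take_eq_cons (p : String) (ps : List String) :
    (List.range (p :: ps).length).map (fun k => PySem.Str.join "." ((p :: ps).take (k + 1)))
      = p :: prefJoins p ps := by
  simp only [List.length_cons, List.range_succ_eq_map, List.map_cons, List.map_map,
    List.cons.injEq]
  constructor
  · apply str_toList_inj
    simp [PySem.Str.toList_join, PySem.Chars.join_singleton]
  · calc (List.range ps.length).map
          ((fun k => PySem.Str.join "." ((p :: ps).take (k + 1))) ∘ Nat.succ)
        = (List.range ps.length).map (fun k => PySem.Str.join "." (p :: ps.take (k + 1))) := by
          apply List.map_congr_left; intro k _; simp [Function.comp]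
      _ = prefJoins p ps := range_map_join ps p

-- ===== VERDICT (by name: the statement is the Claim_ definition above) =====
theorem get_namespace_hierarchy_spec : Claim_equal_get_namespace_hierarchy := by
  intro ns _
  unfold Spec_get_namespace_hierarchy get_namespace_hierarchy get_namespace_hierarchy_alt
  by_cases h : ns = ""
  · simp [h]
  · simp only [h, if_false]
    generalize (PySem.Str.split? ns ".").getD [] = parts
    rw [foldl_append_singleton, PySem.List.pyRange_one, List.map_map]
    simp only [Int.sub_zero, Int.toNat_natCast]
    have hcast : ∀ k : Nat,
        PySem.Str.join "." (PySem.List.slice parts none (some ((0 : Int) + ↑k + 1)))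
          = PySem.Str.join "." (parts.take (k + 1)) := by
      intro k
      have : ((0 : Int) + ↑k + 1) = ((k + 1 : Nat) : Int) := by push_cast; ring
      rw [this, PySem.List.slice_to_natCast]
    cases parts with
    | nil => simp
    | cons p ps =>
        rw [List.nil_append]
        calc (List.range (p :: ps).length).map
                ((fun k => PySem.Str.join "."
                  (PySem.List.slice (p :: ps) none (some ((0:Int) + ↑k + 1)))))
              = (List.range (p :: ps).length).map
                (fun k => PySem.Str.join "." ((p :: ps).take (k + 1))) := by
                apply List.map_congr_left; intro k _; exact hcast k
          _ = p :: prefJoins p ps := map_take_eq_cons p ps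
          _ = _ := by
                rw [List.foldl_cons]
                simpa using (alt_fold_some ps p [p]).symm
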